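-- pv_equiv track=rewrite | github.com/coms2132-spring26/coms2132-spring26-materials | lectures/lecture11/npuzzle.py | goal_test
-- ===== SOURCE A (Python) =====
-- def goal_test(state):
--     """
--     Returns True if the state is a goal state, False otherwise.
--     """
--     counter = 0
--     for row in state:
--         for cell in row:
--             if counter != cell:
--                 return False
--             counter += 1
--     return True
-- ===== SOURCE B (Python) =====
-- def goal_test(state):
--     flat = [cell for row in state for cell in row]
--     if not flat:
--         return True
--     return flat[0] == 0 and all(b - a == 1 for a, b in zip(flat, flat[1:]))
-- ===== Notes on version B (the rewrite author's own statement) =====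
-- stated objective: alternative
-- what changed: Replaces the global incrementing-counter comparison with a local characterization: the first cell is 0 and every adjacent pair of flattened cells differs by exactly 1, checked over zipped neighbor pairs.
import Mathlib
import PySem

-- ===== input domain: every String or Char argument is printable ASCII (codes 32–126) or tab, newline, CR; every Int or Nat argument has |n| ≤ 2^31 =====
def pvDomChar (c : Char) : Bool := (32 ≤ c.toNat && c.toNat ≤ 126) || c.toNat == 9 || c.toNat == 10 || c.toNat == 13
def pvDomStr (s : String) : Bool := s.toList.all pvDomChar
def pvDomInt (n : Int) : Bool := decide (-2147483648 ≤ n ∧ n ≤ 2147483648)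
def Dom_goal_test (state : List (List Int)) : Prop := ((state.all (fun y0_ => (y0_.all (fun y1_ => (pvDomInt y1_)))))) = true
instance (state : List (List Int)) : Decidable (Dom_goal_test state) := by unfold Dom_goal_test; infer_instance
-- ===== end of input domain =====

-- B replaces A's global incrementing-counter comparison by a local neighbor check:
-- the first flattened cell is 0 and every adjacent pair differs by exactly 1 (objective: alternative).


-- ===== PORT A =====
-- inner 'for cell in row' loop: none = A hit 'return False'; some c' = counter after the row
def goalCells (counter : Int) : List Int → Option Int
  | [] => some counter
  | cell :: rest => if counter ≠ cell then none else goalCells (counter + 1) rest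

-- outer 'for row in state' loop
def goalRows (counter : Int) : List (List Int) → Bool
  | [] => true
  | row :: rest =>
      match goalCells counter row with
      | none => false
      | some c' => goalRows c' rest

def goal_test (state : List (List Int)) : Bool := goalRows 0 state

-- ===== PORT B =====
-- all(b - a == 1 for a, b in zip(flat, flat[1:]))
def consec (flat : List Int) : Bool :=
  (flat.zip flat.tail).all (fun p => p.2 - p.1 == 1)

-- flat = [cell for row in state for cell in row]
-- if not flat: return True
-- return flat[0] == 0 and all(b - a == 1 for a, b in zip(flat, flat[1:]))
def goal_test_alt (state : List (List Int)) : Bool :=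
  let flat := state.flatMap (fun row => row)
  match flat with
  | [] => true
  | f :: _ => (f == 0) && consec flat

-- ===== PRECONDITION & SPEC =====
def Spec_goal_test (state : List (List Int)) (out : Bool) : Prop := out = goal_test_alt state
instance (state : List (List Int)) (out : Bool) : Decidable (Spec_goal_test state out) := by unfold Spec_goal_test; infer_instance

-- ===== CLAIM (what is proved, stated in full; the proofs are below) =====
def Claim_equal_goal_test : Prop := ∀ (state : List (List Int)), Dom_goal_test state → Spec_goal_test state (goal_test state)

-- ===== LEMMAS AND PROOFS =====

-- the consecutive run c, c+1, …, c+n-1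
def pat (c : Int) (n : Nat) : List Int := List.map (fun i : Nat => c + (i : Int)) (List.range n)

lemma pat_succ (c : Int) (n : Nat) : pat c (n+1) = c :: pat (c+1) n := by
  simp [pat, List.range_succ_eq_map, List.map_map, Function.comp]
  intro a _; ring

lemma pat_add (c : Int) (m n : Nat) : pat c (m+n) = pat c m ++ pat (c + m) n := by
  simp [pat, List.range_add, List.map_map, Function.comp]
  intro a _; ring

lemma pat_length (c : Int) (n : Nat) : (pat c n).length = n := by simp [pat]

lemma goalCells_eq (row : List Int) (c : Int) :
    goalCells c row = if row = pat c row.length then some (c + row.length) else none := by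
  induction row generalizing c with
  | nil => simp [goalCells, pat]
  | cons x xs ih =>
      simp only [goalCells, List.length_cons, pat_succ]
      by_cases hx : c = x
      · subst hx
        rw [if_neg (by simp), ih (c + 1)]
        by_cases hxs : xs = pat (c + 1) xs.length
        · rw [if_pos hxs, if_pos (by rw [← hxs]), Option.some_inj]
          push_cast; ring
        · rw [if_neg hxs, if_neg]
          intro h
          rw [List.cons.injEq] at h
          exact hxs h.2
      · rw [if_pos (by simp [hx]), if_neg]
        intro h
        rw [List.cons.injEq] at h
        exact hx h.1.symm

lemma goalRows_eq (state : List (List Int)) (c : Int) :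
    goalRows c state =
      decide ((state.flatMap (fun row => row)) = pat c (state.flatMap (fun row => row)).length) := by
  induction state generalizing c with
  | nil => simp [goalRows, pat]
  | cons row rest ih =>
      simp only [goalRows, List.flatMap_cons, List.length_append]
      rw [goalCells_eq, pat_add]
      by_cases hr : row = pat c row.length
      · rw [if_pos hr]
        show goalRows (c + (row.length : Int)) rest = _
        rw [ih (c + row.length)]
        by_cases hrest : rest.flatMap (fun r => r) =
            pat (c + row.length) (rest.flatMap (fun r => r)).length
        · rw [decide_eq_true hrest, Eq.comm, decide_eq_true_iff]
          exact congrArg₂ (· ++ ·) hr hrest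
        · rw [decide_eq_false hrest, Eq.comm, decide_eq_false_iff_not]
          intro h
          exact hrest (List.append_inj h (by simp [pat_length]) |>.2)
      · rw [if_neg hr, Eq.comm, decide_eq_false_iff_not]
        intro h
        exact hr (List.append_inj h (pat_length c _).symm |>.1)

-- B's local characterization: a list is the run c, c+1, … iff it is empty, or
-- starts with c and every adjacent pair differs by 1.
lemma pat_iff_consec (l : List Int) (c : Int) :
    l = pat c l.length ↔ (l = [] ∨ (l.head? = some c ∧ consec l = true)) := by
  induction l generalizing c with
  | nil => simp [pat]
  | cons x xs ih =>
      rw [List.length_cons, pat_succ]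
      cases xs with
      | nil => simp [pat, consec]
      | cons y ys =>
          have hih := ih (c + 1)
          constructor
          · rintro h
            rw [List.cons.injEq] at h
            obtain ⟨hx, hxs⟩ := h
            right
            have := hih.mp hxs
            rcases this with h0 | ⟨hh, hc⟩
            · exact absurd h0 (by simp)
            · refine ⟨by simp [hx], ?_⟩
              simp only [List.head?] at hh
              simp only [consec, List.zip, List.tail] at hc ⊢
              simp only [List.zipWith] at hc ⊢
              have hy : y = c + 1 := by injection hh
              simp [hy, hx]
              simpa [hy] using hc
          · rintro (h0 | ⟨hh, hc⟩)
            · exact absurd h0 (by simp)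
            · have hx : x = c := by injection hh
              rw [List.cons.injEq]
              refine ⟨hx, hih.mpr ?_⟩
              right
              simp only [consec, List.zip, List.tail, List.zipWith, List.all_cons,
                Bool.and_eq_true, beq_iff_eq] at hc
              obtain ⟨h1, h2⟩ := hc
              have hy : y = c + 1 := by rw [hx] at h1; omega
              exact ⟨by simp [hy], by simpa [consec, List.zip] using h2⟩

-- ===== VERDICT (by name: the statement is the Claim_ definition above) =====
theorem goal_test_spec : Claim_equal_goal_test := by
  intro state _
  unfold Spec_goal_test goal_test goal_test_alt
  rw [goalRows_eq]
  set flat := state.flatMap (fun row => row) with hflat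
  cases hf : flat with
  | nil => simp [pat]
  | cons x xs =>
      by_cases h : (x :: xs) = pat 0 (x :: xs).length
      · have := (pat_iff_consec (x :: xs) 0).mp h
        rcases this with h0 | ⟨hh, hc⟩
        · exact absurd h0 (by simp)
        · have hx : x = 0 := by simpa [List.head?] using hh
          subst hx
          rw [decide_eq_true (by simpa using h)]; simp [hc]
      · rw [hf] at *
        rw [decide_eq_false h]
        by_cases hx : x = 0
        · by_cases hc : consec (x :: xs) = true
          · exact absurd ((pat_iff_consec (x :: xs) 0).mpr (Or.inr ⟨by simp [hx], hc⟩)) h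
          · simp [Bool.eq_false_iff.mpr hc]
        · simp [hx]
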